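-- pv_equiv track=rewrite | github.com/NikitaFir/Leetcode | Greatest Common Divisor of Strings.py | delims
-- ===== SOURCE A (Python) =====
-- def delims(delim, str):
--
--     if len(str) % len(delim) != 0:
--         return False
--     size = len(delim)
--     for i in range(0, len(str), size):
--         y = str[i:i + size:1]
--         if delim != y:
--             return False
--     return True
-- ===== SOURCE B (Python) =====
-- def delims(delim, str):
--     size = len(delim)
--     if len(str) % size != 0:
--         return False
--     return str == delim * (len(str) // size)
-- ===== Notes on version B (the rewrite author's own statement) =====
-- stated objective: simpler
-- what changed: Replaces the per-chunk slice-and-compare loop with a single closed-form equality: str == delim repeated len(str)//len(delim) times (the divisibility check kept first, so empty delim still raises ZeroDivisionError in both).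
import Mathlib
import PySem

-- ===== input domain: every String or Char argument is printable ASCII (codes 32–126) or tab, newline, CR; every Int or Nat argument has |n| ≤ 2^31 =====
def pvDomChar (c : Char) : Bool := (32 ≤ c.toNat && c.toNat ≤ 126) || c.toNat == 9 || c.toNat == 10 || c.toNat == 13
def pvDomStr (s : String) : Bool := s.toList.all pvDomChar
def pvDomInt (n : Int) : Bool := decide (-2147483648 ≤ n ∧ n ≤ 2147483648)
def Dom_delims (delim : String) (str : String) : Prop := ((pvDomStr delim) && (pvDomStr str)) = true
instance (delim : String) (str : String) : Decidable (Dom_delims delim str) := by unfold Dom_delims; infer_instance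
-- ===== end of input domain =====

-- B replaces A's per-chunk slice-and-compare loop with the closed form: divisibility check, then one
-- equality against delim repeated len(str)//len(delim) times (objective: simpler).


-- ===== PORT A =====
-- the 'for i in range(0, len(str), size)' loop with its early 'return False';
-- string comparison 'delim != y' done on the character lists (exact)
def delimsLoop (dl sl : List Char) (size : Int) : List Int → Bool
  | [] => true
  | i :: rest =>
      let y := PySem.List.slice sl (some i) (some (i + size))
      if dl ≠ y then false else delimsLoop dl sl size rest

def delims (delim : String) (str : String) : Bool :=
  if PySem.Int.mod (PySem.Str.len str) (PySem.Str.len delim) ≠ 0 then false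
  else
    let size := PySem.Str.len delim
    delimsLoop delim.toList str.toList size (PySem.List.pyRange 0 (PySem.Str.len str) size)

-- ===== PORT B =====
-- 'delim * q' (string repetition) ported as (List.replicate q delim.toList).flatten;
-- 'str == …' compared on the character lists (exact)
def delims_alt (delim : String) (str : String) : Bool :=
  let size := PySem.Str.len delim
  if PySem.Int.mod (PySem.Str.len str) size ≠ 0 then false
  else
    decide (str.toList =
      (List.replicate (PySem.Int.floordiv (PySem.Str.len str) size).toNat delim.toList).flatten)

-- ===== PRECONDITION & SPEC =====
-- Pre_ excludes only delim = "", on which both A and B raise ZeroDivisionError (len(str) % 0)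
def Pre_delims (delim : String) (str : String) : Prop := delim ≠ ""
instance (delim : String) (str : String) : Decidable (Pre_delims delim str) := by unfold Pre_delims; infer_instance
def pvWitness_delims : String × String := ("ab", "abab")
def Spec_delims (delim : String) (str : String) (out : Bool) : Prop := out = delims_alt delim str
instance (delim : String) (str : String) (out : Bool) : Decidable (Spec_delims delim str out) := by unfold Spec_delims; infer_instance

-- ===== CLAIM (what is proved, stated in full; the proofs are below) =====
def Claim_equal_delims : Prop := ∀ (delim : String) (str : String), Dom_delims delim str → Pre_delims delim str → Spec_delims delim str (delims delim str)

-- ===== LEMMAS AND PROOFS =====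

-- the chunk loop over indices j*L, (j+1)*L, … equals one equality against the repeated block
theorem delimsLoop_chunks (dl : List Char) (L : Nat) (hL : L = dl.length) (hd : 0 < L) :
    ∀ (q j : Nat) (sl : List Char), sl.length = (j + q) * L →
    delimsLoop dl sl (L : Int)
        ((List.range q).map (fun (k : Nat) => ((j * L : Nat) : Int) + (L : Int) * (k : Int)))
      = decide (sl.drop (j * L) = (List.replicate q dl).flatten) := by
  intro q
  induction q with
  | zero =>
      intro j sl hs
      have hs' : sl.length ≤ j * L := by simpa using hs.le
      have hnil : sl.drop (j * L) = [] := List.drop_eq_nil_of_le hs'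
      simp [delimsLoop, hnil]
  | succ q ih =>
      intro j sl hs
      rw [List.range_succ_eq_map]
      simp only [List.map_cons, List.map_map, Nat.cast_zero, mul_zero, add_zero]
      have hfun : ((fun (k : Nat) => ((j * L : Nat) : Int) + (L : Int) * (k : Int)) ∘ Nat.succ)
          = fun (k : Nat) => (((j + 1) * L : Nat) : Int) + (L : Int) * (k : Int) := by
        funext k; simp [Function.comp]; ring
      rw [hfun]
      have hslice : PySem.List.slice sl (some ((j * L : Nat) : Int))
          (some (((j * L : Nat) : Int) + (L : Int))) = (sl.drop (j * L)).take L := by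
        exact_mod_cast PySem.List.slice_natCast_add sl (j * L) L
      have hlen : (sl.drop (j * L)).length = (1 + q) * L := by
        simp [hs]; ring_nf; omega
      have hdrop : (sl.drop (j * L)).drop L = sl.drop ((j + 1) * L) := by
        rw [List.drop_drop]; congr 1; ring
      simp only [delimsLoop]
      rw [hslice]
      by_cases hc : dl = (sl.drop (j * L)).take L
      · rw [if_neg (by simp [hc]), ih (j + 1) sl (by rw [hs]; ring)]
        have hsplit : sl.drop (j * L) = (sl.drop (j * L)).take L ++ sl.drop ((j + 1) * L) := by
          rw [← hdrop, List.take_append_drop]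
        have hiff : (sl.drop (j * L) = (List.replicate (q + 1) dl).flatten)
            ↔ (sl.drop ((j + 1) * L) = (List.replicate q dl).flatten) := by
          conv_lhs => rw [hsplit, List.replicate_succ, List.flatten_cons, ← hc]
          exact List.append_right_inj _
        exact (decide_eq_decide.mpr hiff).symm
      · rw [if_pos (by simpa using hc)]
        have hne : sl.drop (j * L) ≠ (List.replicate (q + 1) dl).flatten := by
          intro he
          apply hc
          rw [he, List.replicate_succ, List.flatten_cons, List.take_append_of_le_length (by omega)]
          simp [hL]
        simp [hne]

theorem strToList_ne_nil_of_ne_empty {s : String} (h : s ≠ "") : s.toList ≠ [] := by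
  intro he
  exact h (String.toList_inj.mp (by rw [he]; rfl))

theorem delims_spec_aux (delim str : String) (h : delim ≠ "") :
    delims delim str = delims_alt delim str := by
  have hdl : delim.toList ≠ [] := strToList_ne_nil_of_ne_empty h
  have hL : 0 < delim.toList.length := List.length_pos_iff.mpr hdl
  have hLpos : (0 : Int) < (delim.toList.length : Int) := by exact_mod_cast hL
  simp only [delims, delims_alt, PySem.Str.len_eq]
  by_cases hm : PySem.Int.mod (str.toList.length : Int) (delim.toList.length : Int) ≠ 0
  · rw [if_pos hm, if_pos hm]
  · rw [ne_eq, not_not] at hm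
    rw [if_neg (by simpa using hm), if_neg (by simpa using hm)]
    have hdvd : (delim.toList.length : Int) ∣ (str.toList.length : Int) :=
      (PySem.Int.mod_eq_zero_iff_dvd _ _).mp hm
    have hdvdN : delim.toList.length ∣ str.toList.length := by exact_mod_cast hdvd
    obtain ⟨q, hq⟩ := hdvdN
    have hq' : str.toList.length = q * delim.toList.length := by rw [hq]; ring
    have hfd : (PySem.Int.floordiv ((str.toList.length : Nat) : Int)
        ((delim.toList.length : Nat) : Int)).toNat = q := by
      rw [PySem.Int.floordiv_eq_ediv_of_pos hLpos, hq']
      push_cast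
      rw [Int.mul_ediv_cancel _ hLpos.ne']
      simp
    have hcount : (if (0 : Int) < ((str.toList.length : Nat) : Int)
        then ((((str.toList.length : Nat) : Int) - 0 + (delim.toList.length : Int) - 1)
          / (delim.toList.length : Int)).toNat else 0) = q := by
      by_cases hq0 : q = 0
      · have h0 : str.toList.length = 0 := by rw [hq', hq0, Nat.zero_mul]
        rw [if_neg (by exact_mod_cast (by omega : ¬ (0 < str.toList.length)))]
        omega
      · have hpos : 0 < str.toList.length := by
          rw [hq']; exact Nat.mul_pos (Nat.pos_of_ne_zero hq0) hL
        rw [if_pos (by exact_mod_cast hpos), hq']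
        push_cast
        have hrw : (q : Int) * (delim.toList.length : Int) - 0 + (delim.toList.length : Int) - 1
            = ((delim.toList.length : Int) - 1) + (q : Int) * (delim.toList.length : Int) := by ring
        rw [hrw, Int.add_mul_ediv_right _ _ hLpos.ne',
          Int.ediv_eq_zero_of_lt
            (by omega : (0 : Int) ≤ (delim.toList.length : Int) - 1)
            (by omega : (delim.toList.length : Int) - 1 < (delim.toList.length : Int))]
        simp
    rw [PySem.List.pyRange_of_pos _ _ hLpos, hcount]
    have hbridge : (List.range q).map
          (fun (k : Nat) => (0 : Int) + (delim.toList.length : Int) * (k : Int))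
        = (List.range q).map
          (fun (k : Nat) => ((0 * delim.toList.length : Nat) : Int)
            + (delim.toList.length : Int) * (k : Int)) := by
      apply List.map_congr_left; intro k _; norm_num
    rw [hbridge,
      delimsLoop_chunks delim.toList delim.toList.length rfl hL q 0 str.toList (by rw [hq']; ring)]
    exact decide_eq_decide.mpr (by rw [hfd]; simp)

-- ===== VERDICT (by name: the statement is the Claim_ definition above) =====
theorem delims_spec : Claim_equal_delims := by
  intro delim str _ hpre
  exact delims_spec_aux delim str hpre
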